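-- pv_equiv track=rewrite | github.com/pypi-data/pypi-mirror-96 | packages/english-date-as-bangla-format/english_date_as_bangla_format-0.0.1.tar.gz/english_date_as_bangla_format-0.0.1/english_date_as_bangla_format/en_to_bn_dateformat_converter.py | bn_digit
-- ===== SOURCE A (Python) =====
-- def bn_digit(input_value):
--     """replaces english digits with bengali digits from the input string"""
--     input_str = str(input_value)
--     translated_string_chars = []
--
--     for x in input_str:
--         unicode_diff_with_zero = ord(x) - ord('0')
--         if 0 <= unicode_diff_with_zero <= 9:  # it's a english digit
--             bn_digit_code = ord('০') + unicode_diff_with_zero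
--             translated_string_chars.append(chr(bn_digit_code))
--         else:
--             translated_string_chars.append(x)
--
--     return ''.join(translated_string_chars)
-- ===== SOURCE B (Python) =====
-- def bn_digit(input_value):
--     """replaces english digits with bengali digits from the input string"""
--     s = str(input_value)
--     for offset in range(10):
--         s = s.replace(chr(48 + offset), chr(0x09E6 + offset))
--     return s
-- ===== Notes on version B (the rewrite author's own statement) =====
-- stated objective: alternative
-- what changed: B makes ten staged whole-string str.replace passes (one per digit, each a C-level substring substitution) instead of A's single Python-level per-character loop with ordinal arithmetic, branching and list-append/join.
import Mathlib
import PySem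

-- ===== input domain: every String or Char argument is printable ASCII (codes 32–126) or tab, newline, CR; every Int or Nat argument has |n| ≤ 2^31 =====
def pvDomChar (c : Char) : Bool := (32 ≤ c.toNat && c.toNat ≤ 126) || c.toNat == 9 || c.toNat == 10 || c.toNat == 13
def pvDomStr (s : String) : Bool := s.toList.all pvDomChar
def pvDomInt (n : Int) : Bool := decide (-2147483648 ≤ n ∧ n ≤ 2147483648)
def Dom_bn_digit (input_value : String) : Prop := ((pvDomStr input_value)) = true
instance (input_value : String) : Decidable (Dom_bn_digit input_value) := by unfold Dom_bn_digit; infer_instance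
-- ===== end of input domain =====

-- B replaces A's single per-character loop (ordinal arithmetic + branch + append/join)
-- by ten staged whole-string replace passes, one per digit; same return value.

-- ===== PORT A =====
-- literal transliteration of A: loop over characters, append translated char or the char itself, join
def bn_digit (input_value : String) : String :=
  let translated_string_chars : List Char :=
    input_value.toList.foldl
      (fun acc x =>
        let unicode_diff_with_zero : Int := (x.toNat : Int) - 48   -- ord(x) - ord('0')
        if 0 ≤ unicode_diff_with_zero ∧ unicode_diff_with_zero ≤ 9 then
          acc ++ [Char.ofNat (2534 + unicode_diff_with_zero).toNat]  -- chr(ord('০') + diff)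
        else
          acc ++ [x])
      []
  String.ofList translated_string_chars

-- ===== PORT B =====
-- literal transliteration of B: for offset in range(10): s = s.replace(chr(48+offset), chr(0x09E6+offset))
def bn_digit_alt (input_value : String) : String :=
  (PySem.List.pyRange 0 10 1).foldl
    (fun s offset =>
      PySem.Str.replace s
        (String.ofList [Char.ofNat (48 + offset).toNat])
        (String.ofList [Char.ofNat (2534 + offset).toNat]))
    input_value

-- ===== PRECONDITION & SPEC =====
def Spec_bn_digit (input_value : String) (out : String) : Prop := out = bn_digit_alt input_value
instance (input_value : String) (out : String) : Decidable (Spec_bn_digit input_value out) := by unfold Spec_bn_digit; infer_instance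

-- ===== CLAIM (what is proved, stated in full; the proofs are below) =====
def Claim_equal_bn_digit : Prop := ∀ (input_value : String), Dom_bn_digit input_value → Spec_bn_digit input_value (bn_digit input_value)

-- ===== LEMMAS AND PROOFS =====

-- partial translation: the effect of the first k replace passes on one character
def gStage (k : Nat) (c : Char) : Char :=
  if 48 ≤ c.toNat ∧ c.toNat < 48 + k then Char.ofNat (2534 + (c.toNat - 48)) else c

theorem toNat_ofNat_valid (n : Nat) (h : n < 55296) : (Char.ofNat n).toNat = n := by
  rw [Char.toNat_ofNat, if_pos (Or.inl h)]

theorem char_eq_of_toNat_eq {c d : Char} (h : c.toNat = d.toNat) : c = d := by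
  apply Char.ext
  exact UInt32.toNat_inj.mp h

-- one replace pass (as a per-character map) advances the partial translation by one digit
theorem stage_map (k : Nat) (hk : k ≤ 9) (d r : Char) (hd : d.toNat = 48 + k)
    (hr : r.toNat = 2534 + k) (l : List Char) :
    (l.map (gStage k)).map (fun c => if c == d then r else c) = l.map (gStage (k+1)) := by
  rw [List.map_map]
  apply List.map_congr_left
  intro c _
  show (if gStage k c == d then r else gStage k c) = gStage (k+1) c
  by_cases h1 : 48 ≤ c.toNat ∧ c.toNat < 48 + k
  · have hg : gStage k c = Char.ofNat (2534 + (c.toNat - 48)) := if_pos h1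
    have hvt : (Char.ofNat (2534 + (c.toNat - 48))).toNat = 2534 + (c.toNat - 48) :=
      toNat_ofNat_valid _ (by omega)
    have hbeq : (gStage k c == d) = false := by
      rw [hg]
      apply beq_eq_false_iff_ne.mpr
      intro he
      have h2 := congrArg Char.toNat he
      rw [hvt, hd] at h2
      omega
    rw [hbeq]
    show gStage k c = gStage (k+1) c
    rw [hg]
    exact (if_pos ⟨h1.1, by omega⟩).symm
  · have hg : gStage k c = c := if_neg h1
    rw [hg]
    by_cases h2 : c.toNat = 48 + k
    · have hcd : c = d := char_eq_of_toNat_eq (by rw [hd]; exact h2)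
      rw [if_pos (by rw [hcd]; exact beq_self_eq_true d)]
      have hRHS : gStage (k+1) c = Char.ofNat (2534 + (c.toNat - 48)) :=
        if_pos ⟨by omega, by omega⟩
      rw [hRHS, show 2534 + (c.toNat - 48) = 2534 + k by omega]
      exact char_eq_of_toNat_eq (by rw [hr, toNat_ofNat_valid _ (by omega)])
    · rw [if_neg (fun he => h2 (by rw [congrArg Char.toNat (eq_of_beq he), hd]))]
      exact (if_neg (by omega)).symm

-- the first zero passes change nothing
theorem gStage_zero (l : List Char) : l.map (gStage 0) = l := by
  have h : gStage 0 = id := by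
    funext c
    exact if_neg (by omega)
  rw [h, List.map_id]

-- replace.go with a single-character pattern and replacement is a per-character map
theorem replace_go_single (d r : Char) (l acc : List Char) (fuel : Nat) (h : l.length ≤ fuel) :
    PySem.Chars.replace.go [d] [r] fuel l acc
      = acc.reverse ++ l.map (fun c => if c == d then r else c) := by
  induction l generalizing fuel acc with
  | nil => cases fuel <;> simp [PySem.Chars.replace.go]
  | cons c t ih =>
    cases fuel with
    | zero => simp at h
    | succ fuel =>
      have hstep : PySem.Chars.replace.go [d] [r] (fuel+1) (c::t) acc
          = if [d].isPrefixOf (c::t) then PySem.Chars.replace.go [d] [r] fuel t ([r].reverse ++ acc)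
            else PySem.Chars.replace.go [d] [r] fuel t (c::acc) := by
        rw [PySem.Chars.replace.go.eq_def]; rfl
      rw [hstep]
      have ht : t.length ≤ fuel := by simpa using h
      by_cases hc : c = d
      · rw [if_pos (by simp [List.isPrefixOf, hc]), ih _ fuel ht]
        simp [hc]
      · rw [if_neg (by simp [List.isPrefixOf]; exact fun he => hc he.symm), ih _ fuel ht]
        simp [hc]

theorem replace_single (d r : Char) (l : List Char) :
    PySem.Chars.replace l [d] [r] = l.map (fun c => if c == d then r else c) := by
  simpa [PySem.Chars.replace] using replace_go_single d r l [] l.length le_rfl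

theorem str_replace_single (t : String) (a b : Char) :
    (PySem.Str.replace t (String.ofList [a]) (String.ofList [b])).toList
      = t.toList.map (fun c => if c == a then b else c) := by
  rw [PySem.Str.toList_replace, String.toList_ofList, String.toList_ofList, replace_single]

-- ===== VERDICT (by name: the statement is the Claim_ definition above) =====
theorem bn_digit_spec : Claim_equal_bn_digit := by
  intro s _
  show bn_digit s = bn_digit_alt s
  apply String.toList_inj.mp
  have hr : PySem.List.pyRange 0 10 1 = [0,1,2,3,4,5,6,7,8,9] := by rfl
  simp only [bn_digit, String.toList_ofList]
  unfold bn_digit_alt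
  rw [hr]
  simp only [List.foldl]
  simp only [show Char.ofNat ((48:Int)+0).toNat = '0' from by decide,
    show Char.ofNat ((48:Int)+1).toNat = '1' from by decide,
    show Char.ofNat ((48:Int)+2).toNat = '2' from by decide,
    show Char.ofNat ((48:Int)+3).toNat = '3' from by decide,
    show Char.ofNat ((48:Int)+4).toNat = '4' from by decide,
    show Char.ofNat ((48:Int)+5).toNat = '5' from by decide,
    show Char.ofNat ((48:Int)+6).toNat = '6' from by decide,
    show Char.ofNat ((48:Int)+7).toNat = '7' from by decide,
    show Char.ofNat ((48:Int)+8).toNat = '8' from by decide,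
    show Char.ofNat ((48:Int)+9).toNat = '9' from by decide,
    show Char.ofNat ((2534:Int)+0).toNat = '০' from by decide,
    show Char.ofNat ((2534:Int)+1).toNat = '১' from by decide,
    show Char.ofNat ((2534:Int)+2).toNat = '২' from by decide,
    show Char.ofNat ((2534:Int)+3).toNat = '৩' from by decide,
    show Char.ofNat ((2534:Int)+4).toNat = '৪' from by decide,
    show Char.ofNat ((2534:Int)+5).toNat = '৫' from by decide,
    show Char.ofNat ((2534:Int)+6).toNat = '৬' from by decide,
    show Char.ofNat ((2534:Int)+7).toNat = '৭' from by decide,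
    show Char.ofNat ((2534:Int)+8).toNat = '৮' from by decide,
    show Char.ofNat ((2534:Int)+9).toNat = '৯' from by decide]
  simp only [str_replace_single]
  conv_rhs =>
    rw [← gStage_zero s.toList,
      stage_map 0 (by omega) '0' '০' (by decide) (by decide),
      stage_map 1 (by omega) '1' '১' (by decide) (by decide),
      stage_map 2 (by omega) '2' '২' (by decide) (by decide),
      stage_map 3 (by omega) '3' '৩' (by decide) (by decide),
      stage_map 4 (by omega) '4' '৪' (by decide) (by decide),
      stage_map 5 (by omega) '5' '৫' (by decide) (by decide),
      stage_map 6 (by omega) '6' '৬' (by decide) (by decide),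
      stage_map 7 (by omega) '7' '৭' (by decide) (by decide),
      stage_map 8 (by omega) '8' '৮' (by decide) (by decide),
      stage_map 9 (by omega) '9' '৯' (by decide) (by decide)]
  have hfun : (fun (acc : List Char) (x : Char) =>
        let unicode_diff_with_zero : Int := (x.toNat : Int) - 48
        if 0 ≤ unicode_diff_with_zero ∧ unicode_diff_with_zero ≤ 9 then
          acc ++ [Char.ofNat (2534 + unicode_diff_with_zero).toNat]
        else acc ++ [x])
      = (fun acc x => acc ++
          [if 0 ≤ (x.toNat : Int) - 48 ∧ (x.toNat : Int) - 48 ≤ 9 then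
            Char.ofNat (2534 + ((x.toNat : Int) - 48)).toNat
          else x]) := by
    funext acc x
    show (if 0 ≤ (x.toNat : Int) - 48 ∧ (x.toNat : Int) - 48 ≤ 9 then
        acc ++ [Char.ofNat (2534 + ((x.toNat : Int) - 48)).toNat] else acc ++ [x]) = _
    split <;> rfl
  rw [hfun, PySem.List.foldl_append_singleton_eq_map]
  apply List.map_congr_left
  intro c _
  show (if 0 ≤ (c.toNat : Int) - 48 ∧ (c.toNat : Int) - 48 ≤ 9 then
      Char.ofNat (2534 + ((c.toNat : Int) - 48)).toNat else c) = gStage 10 c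
  by_cases h : 48 ≤ c.toNat ∧ c.toNat ≤ 57
  · rw [if_pos (by omega), show gStage 10 c = Char.ofNat (2534 + (c.toNat - 48)) from if_pos (by omega)]
    congr 1
    omega
  · rw [if_neg (by omega)]
    exact (if_neg (by omega)).symm
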